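-- pv_equiv track=rewrite | github.com/thorbert-anson-shi/Dasar-Dasar-Pemrograman-1 | TP 3/tp3_demo-ver.py | select_cols
-- ===== SOURCE A (Python) =====
-- def to_list(dataframe) -> list:
--     return dataframe[0]
--
-- def get_column_names(dataframe) -> list:
--     return dataframe[1]
--
-- def get_column_types(dataframe) -> list:
--     return dataframe[2]
--
-- def select_cols(dataframe, selected_cols: list) -> tuple:
--     """
--     Mengembalikan dataframe baru dimana kolom-kolom sudah
--     dipilih hanya yang terdapat pada 'selected_cols' saja.
--
--     contoh:
--     select_cols(dataframe, ["umur", "nama"]) akan mengembalikan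
--     dataframe baru yang hanya terdiri dari kolom "umur" dan "nama".
--
--     Exceptions:
--       1. jika ada nama kolom pada selected_cols yang tidak
--          ditemukan,
--
--            raise Exception(f"Kolom {selected_col} tidak ditemukan.")
--
--       2. jika select_cols adalah list kosong [],
--
--            raise Exception("Parameter selected_cols tidak boleh kosong.")
--
--     parameter:
--     dataframe (list, list, list): sebuah dataframe
--     selected_cols (list): list of strings, atau list yang berisi
--                           daftar nama kolom
--
--     return (list, list, list): dataframe baru hasil selection pada
--                                kolom, yaitu hanya mengandung kolom-
--                                kolom pada selected_cols saja.
--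
--     """
--     # TODO: Implement
--     if selected_cols == []:
--         raise Exception(f"Parameter selected_cols tidak boleh kosong.")
--
--     data = to_list(dataframe)
--     col_names = get_column_names(dataframe)
--     col_types = get_column_types(dataframe)
--
--     target_col_idx = []
--     target_col_types = []
--
--     filtered_data = []
--
--     for col in selected_cols:
--         try:
--             target_idx = col_names.index(col)
--         except ValueError:
--             raise Exception(f"Kolom {col} tidak ditemukan.")
--
--         target_col_idx.append(target_idx)
--
--     for col_idx in target_col_idx:
--         target_col_types.append(col_types[col_idx])
--
--     for row_idx in range(len(data)):
--         temp = []
--         for col_idx in target_col_idx: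
--             temp.append(data[row_idx][col_idx])
--         filtered_data.append(temp)
--
--     return filtered_data, selected_cols, target_col_types
-- ===== SOURCE B (Python) =====
-- def select_cols(dataframe, selected_cols: list) -> tuple:
--     if not selected_cols:
--         raise Exception("Parameter selected_cols tidak boleh kosong.")
--
--     data, col_names, col_types = dataframe
--
--     first_idx = {}
--     for i, name in enumerate(col_names):
--         if name not in first_idx:
--             first_idx[name] = i
--
--     target_col_idx = []
--     for col in selected_cols:
--         if col not in first_idx:
--             raise Exception(f"Kolom {col} tidak ditemukan.")
--         target_col_idx.append(first_idx[col])
--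
--     target_col_types = [col_types[i] for i in target_col_idx]
--     columns = [[row[i] for row in data] for i in target_col_idx]
--     filtered_data = [list(r) for r in zip(*columns)]
--
--     return filtered_data, selected_cols, target_col_types
-- ===== Notes on version B (the rewrite author's own statement) =====
-- stated objective: alternative
-- what changed: B resolves column names through a first-occurrence index dictionary built once over col_names instead of calling list.index per selected name, and builds the result column-major (materialising each selected column, then transposing with zip) instead of A's row-by-row nested loops.
import Mathlib
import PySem

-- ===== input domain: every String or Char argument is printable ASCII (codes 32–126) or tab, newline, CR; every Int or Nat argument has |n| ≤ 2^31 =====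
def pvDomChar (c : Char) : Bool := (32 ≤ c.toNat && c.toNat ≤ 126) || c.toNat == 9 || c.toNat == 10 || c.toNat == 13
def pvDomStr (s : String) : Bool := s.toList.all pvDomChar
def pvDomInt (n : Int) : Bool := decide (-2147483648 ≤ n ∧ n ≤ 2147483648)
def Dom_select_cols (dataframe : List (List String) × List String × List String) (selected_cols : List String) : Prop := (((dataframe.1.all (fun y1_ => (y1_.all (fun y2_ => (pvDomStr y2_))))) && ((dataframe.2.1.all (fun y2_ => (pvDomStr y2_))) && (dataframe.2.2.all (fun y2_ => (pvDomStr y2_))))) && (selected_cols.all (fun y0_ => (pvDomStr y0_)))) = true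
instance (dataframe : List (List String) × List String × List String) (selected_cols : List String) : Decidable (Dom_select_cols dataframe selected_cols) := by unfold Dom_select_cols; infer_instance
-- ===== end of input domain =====

-- B replaces the per-name linear scan (list.index) by a first-occurrence index dictionary built
-- once over the column names, and builds the result column-major (materialise each selected column,
-- then transpose with zip) instead of row-by-row; equivalence of return values is proved on Pre_.

-- ===== PORT A =====
def select_cols (dataframe : List (List String) × List String × List String) (selected_cols : List String) : List (List String) × List String × List String :=
  if selected_cols = [] then ([], [], [])   -- Python raises here; excluded by Pre_
  else
    let data := dataframe.1
    let col_names := dataframe.2.1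
    let col_types := dataframe.2.2
    let target_col_idx : List Int :=
      selected_cols.foldl (fun acc col =>
        acc ++ [(((PySem.List.index? col_names col).getD 0 : Nat) : Int)]) []
        -- .index raising ValueError (name absent) is excluded by Pre_; getD is then never the default
    let target_col_types : List String :=
      target_col_idx.foldl (fun acc i => acc ++ [PySem.List.pyGetD col_types i ""]) []
        -- col_types[i] IndexError excluded by Pre_
    let filtered_data : List (List String) :=
      (PySem.List.pyRange 0 (data.length : Int) 1).foldl (fun acc r =>
        acc ++ [target_col_idx.foldl (fun t i =>
          t ++ [PySem.List.pyGetD (PySem.List.pyGetD data r []) i ""]) []]) []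
        -- row[i] IndexError excluded by Pre_
    (filtered_data, selected_cols, target_col_types)

-- ===== PORT B =====
-- port of zip(*cols) for lists of strings: truncate at the shortest column (exact for Python zip)
def zipStarGo : Nat → List (List String) → List (List String)
  | 0, _ => []
  | n + 1, cols => cols.map (fun c => c.headD "") :: zipStarGo n (cols.map List.tail)

def zipStar (cols : List (List String)) : List (List String) :=
  match cols with
  | [] => []
  | c :: cs => zipStarGo (cs.foldl (fun m col => min m col.length) c.length) (c :: cs)

def select_cols_alt (dataframe : List (List String) × List String × List String) (selected_cols : List String) : List (List String) × List String × List String :=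
  if selected_cols = [] then ([], [], [])   -- Python raises here; excluded by Pre_
  else
    let data := dataframe.1
    let col_names := dataframe.2.1
    let col_types := dataframe.2.2
    let first_idx : PySem.Dict String Int :=
      (PySem.List.enumerate col_names 0).foldl
        (fun d p => if d.contains p.2 then d else d.insert p.2 p.1) PySem.Dict.empty
    let target_col_idx : List Int :=
      selected_cols.foldl (fun acc c => acc ++ [(first_idx.get? c).getD 0]) []
        -- the Python raises when c is missing; excluded by Pre_, so getD is never the default
    let target_col_types : List String :=
      target_col_idx.map (fun i => PySem.List.pyGetD col_types i "")
    let columns : List (List String) :=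
      target_col_idx.map (fun i => data.map (fun row => PySem.List.pyGetD row i ""))
    (zipStar columns, selected_cols, target_col_types)

-- ===== PRECONDITION & SPEC =====
-- Pre_ is exactly where Python A returns: selected_cols non-empty (else A raises Exception),
-- every selected name occurs in col_names (else A raises Exception), and the resolved first-match
-- index is in range for col_types and for every data row (else A raises IndexError).
def Pre_select_cols (dataframe : List (List String) × List String × List String) (selected_cols : List String) : Prop :=
  selected_cols ≠ [] ∧ ∀ c ∈ selected_cols, c ∈ dataframe.2.1 ∧
    dataframe.2.1.idxOf c < dataframe.2.2.length ∧
    ∀ row ∈ dataframe.1, dataframe.2.1.idxOf c < row.length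
instance (dataframe : List (List String) × List String × List String) (selected_cols : List String) : Decidable (Pre_select_cols dataframe selected_cols) := by unfold Pre_select_cols; infer_instance

def pvWitness_select_cols : (List (List String) × List String × List String) × List String :=
  (([["1", "x"], ["2", "y"]], ["a", "b"], ["int", "str"]), ["b", "a"])

def Spec_select_cols (dataframe : List (List String) × List String × List String) (selected_cols : List String) (out : List (List String) × List String × List String) : Prop := out = select_cols_alt dataframe selected_cols
instance (dataframe : List (List String) × List String × List String) (selected_cols : List String) (out : List (List String) × List String × List String) : Decidable (Spec_select_cols dataframe selected_cols out) := by unfold Spec_select_cols; infer_instance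

-- ===== CLAIM (what is proved, stated in full; the proofs are below) =====
def Claim_equal_select_cols : Prop := ∀ (dataframe : List (List String) × List String × List String) (selected_cols : List String), Dom_select_cols dataframe selected_cols → Pre_select_cols dataframe selected_cols → Spec_select_cols dataframe selected_cols (select_cols dataframe selected_cols)

-- ===== LEMMAS AND PROOFS =====

-- the first-occurrence dictionary of B resolves a name exactly as list.index does
lemma firstIdx_get? (names : List String) (s : Int) (d : PySem.Dict String Int) (c : String) :
    ((PySem.List.enumerate names s).foldl
      (fun d p => if d.contains p.2 then d else d.insert p.2 p.1) d).get? c =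
    (d.get? c).or ((PySem.List.index? names c).map (fun k => s + (k : Int))) := by
  induction names generalizing s d with
  | nil => simp [PySem.List.enumerate_nil, PySem.List.index?]
  | cons x xs ih =>
    rw [PySem.List.enumerate_cons, List.foldl_cons, ih]
    by_cases hx : x = c
    · subst hx
      rw [PySem.List.index?_cons_self]
      cases h : d.get? x with
      | some v =>
        have hc : d.contains x = true := by rw [PySem.Dict.contains_eq_isSome_get?, h]; rfl
        rw [if_pos hc, h]
        rfl
      | none =>
        have hc : ¬ d.contains x = true := by rw [PySem.Dict.contains_eq_isSome_get?, h]; simp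
        rw [if_neg hc, PySem.Dict.get?_insert_self]
        simp
    · have hxc : c ≠ x := fun h => hx h.symm
      have hd' : (if d.contains x then d else d.insert x s).get? c = d.get? c := by
        split
        · rfl
        · exact PySem.Dict.get?_insert_of_ne d s hxc
      rw [hd', PySem.List.index?_cons_of_ne xs hx]
      cases h : PySem.List.index? xs c with
      | none => simp
      | some k => cases hdc : d.get? c <;> (simp; try omega)

lemma foldl_min_const (l : List (List String)) (n : Nat) (h : ∀ x ∈ l, x.length = n) :
    l.foldl (fun m col => min m col.length) n = n := by
  induction l with
  | nil => rfl
  | cons x xs ih =>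
    rw [List.foldl_cons, h x List.mem_cons_self, min_self]
    exact ih (fun y hy => h y (List.mem_cons_of_mem x hy))

lemma zipStarGo_map (g : Int → List String → String) (idxs : List Int) (data : List (List String)) :
    zipStarGo data.length (idxs.map (fun i => data.map (fun row => g i row))) =
      data.map (fun row => idxs.map (fun i => g i row)) := by
  induction data with
  | nil => simp [zipStarGo]
  | cons row rest ih =>
    simp only [List.length_cons, zipStarGo, List.map_map, Function.comp_def, List.headD_cons,
      List.tail_cons, List.map_cons]
    rw [ih]

lemma zipStar_cons (c : List String) (cs : List (List String)) :
    zipStar (c :: cs) = zipStarGo (cs.foldl (fun m col => min m col.length) c.length) (c :: cs) := rfl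

lemma zipStar_map (g : Int → List String → String) (idxs : List Int) (hne : idxs ≠ [])
    (data : List (List String)) :
    zipStar (idxs.map (fun i => data.map (fun row => g i row))) =
      data.map (fun row => idxs.map (fun i => g i row)) := by
  cases idxs with
  | nil => exact absurd rfl hne
  | cons i is =>
    show zipStar ((data.map (fun row => g i row)) :: is.map (fun i => data.map (fun row => g i row))) = _
    rw [zipStar_cons]
    rw [foldl_min_const _ _ (by
      intro x hx
      rcases List.mem_map.mp hx with ⟨j, _, rfl⟩
      simp), List.length_map]
    exact zipStarGo_map g (i :: is) data

lemma map_range_getD {α : Type} (data : List (List String)) (f : List String → α) :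
    (List.range data.length).map (fun k => f (data.getD k [])) = data.map f := by
  induction data with
  | nil => rfl
  | cons row rest ih =>
    rw [List.length_cons, List.range_succ_eq_map]
    simp only [List.map_cons, List.map_map, Function.comp_def, List.getD_cons_zero,
      List.getD_cons_succ]
    rw [ih]

-- ===== VERDICT (by name: the statement is the Claim_ definition above) =====
theorem select_cols_spec : Claim_equal_select_cols := by
  intro df sel _ hpre
  obtain ⟨hne, hmem⟩ := hpre
  unfold Spec_select_cols
  simp only [select_cols, select_cols_alt, if_neg hne]
  have hidx :
      sel.foldl (fun acc col => acc ++ [(((PySem.List.index? df.2.1 col).getD 0 : Nat) : Int)]) [] =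
      sel.foldl (fun acc c => acc ++
        [(((PySem.List.enumerate df.2.1 0).foldl
            (fun d p => if d.contains p.2 then d else d.insert p.2 p.1)
            PySem.Dict.empty).get? c).getD 0]) [] := by
    rw [PySem.List.foldl_append_singleton_eq_map, PySem.List.foldl_append_singleton_eq_map]
    apply List.map_congr_left
    intro c hc
    have hcn : c ∈ df.2.1 := (hmem c hc).1
    rw [firstIdx_get?, PySem.Dict.get?_empty, Option.none_or]
    rcases Option.isSome_iff_exists.mp ((PySem.List.index?_isSome_iff df.2.1 c).mpr hcn) with ⟨k, hk⟩
    rw [hk]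
    simp
  rw [← hidx]
  set idxs : List Int := sel.foldl
    (fun acc col => acc ++ [(((PySem.List.index? df.2.1 col).getD 0 : Nat) : Int)]) [] with hidxs
  have hidxs_ne : idxs ≠ [] := by
    rw [hidxs, PySem.List.foldl_append_singleton_eq_map]
    simpa using hne
  refine Prod.ext ?_ (Prod.ext rfl ?_)
  · -- filtered data: A row-major vs B column-major + transpose
    show (PySem.List.pyRange 0 (df.1.length : Int) 1).foldl (fun acc r =>
        acc ++ [idxs.foldl (fun t i =>
          t ++ [PySem.List.pyGetD (PySem.List.pyGetD df.1 r []) i ""]) []]) [] =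
      zipStar (idxs.map (fun i => df.1.map (fun row => PySem.List.pyGetD row i "")))
    rw [zipStar_map (fun i row => PySem.List.pyGetD row i "") idxs hidxs_ne df.1,
      PySem.List.foldl_append_singleton_eq_map, PySem.List.pyRange_zero_natCast, List.map_map,
      List.nil_append]
    have hinner : ∀ k : Nat, idxs.foldl (fun t i =>
        t ++ [PySem.List.pyGetD (PySem.List.pyGetD df.1 (k : Int) []) i ""]) [] =
        idxs.map (fun i => PySem.List.pyGetD (df.1.getD k []) i "") := by
      intro k
      rw [PySem.List.foldl_append_singleton_eq_map]
      simp
    simp only [Function.comp_def, hinner]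
    exact map_range_getD df.1 (fun row => idxs.map (fun i => PySem.List.pyGetD row i ""))
  · -- column types
    show idxs.foldl (fun acc i => acc ++ [PySem.List.pyGetD df.2.2 i ""]) [] =
      idxs.map (fun i => PySem.List.pyGetD df.2.2 i "")
    rw [PySem.List.foldl_append_singleton_eq_map, List.nil_append]
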